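-- pv_equiv track=rewrite | github.com/Fransandi/Google-Foobar-Challenge | Level 2/Bunny Worker Locations/solution.py | solution
-- ===== SOURCE A (Python) =====
-- def solution(x, y):
--     worker_id = 0
--
--     increment = 1
--     for _ in range(x):
--         worker_id+=increment
--         increment+=1
--
--     increment = x
--     for _ in range(y-1):
--         worker_id+=increment
--         increment+=1
--
--     return str(worker_id)
-- ===== SOURCE B (Python) =====
-- def solution(x, y):
--     a = max(x, 0)
--     b = max(y - 1, 0)
--     return str(a * (a + 1) // 2 + b * x + b * (b - 1) // 2)
-- ===== Notes on version B (the rewrite author's own statement) =====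
-- stated objective: faster
-- what changed: Replaced the two accumulation loops by closed-form arithmetic-series sums (triangular numbers), computed in O(1).
import Mathlib
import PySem

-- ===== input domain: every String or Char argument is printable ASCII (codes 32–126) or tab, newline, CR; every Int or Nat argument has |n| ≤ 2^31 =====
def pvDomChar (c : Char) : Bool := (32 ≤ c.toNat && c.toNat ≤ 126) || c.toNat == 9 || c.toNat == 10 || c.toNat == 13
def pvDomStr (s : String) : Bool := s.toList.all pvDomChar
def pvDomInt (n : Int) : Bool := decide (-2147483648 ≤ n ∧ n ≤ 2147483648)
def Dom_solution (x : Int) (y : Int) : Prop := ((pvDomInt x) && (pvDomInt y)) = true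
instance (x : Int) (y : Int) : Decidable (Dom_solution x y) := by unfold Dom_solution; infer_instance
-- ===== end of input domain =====

-- B replaces A's two accumulation loops by closed-form arithmetic-series sums (O(1) vs O(x+y)).


-- ===== PORT A =====
def solution (x : Int) (y : Int) : String :=
  let s1 := (PySem.List.pyRange 0 x 1).foldl
      (fun (st : Int × Int) _ => (st.1 + st.2, st.2 + 1)) (0, 1)
  let s2 := (PySem.List.pyRange 0 (y - 1) 1).foldl
      (fun (st : Int × Int) _ => (st.1 + st.2, st.2 + 1)) (s1.1, x)
  PySem.Int.toStr s2.1

-- ===== PORT B =====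
def solution_alt (x : Int) (y : Int) : String :=
  let a := max x 0
  let b := max (y - 1) 0
  PySem.Int.toStr (PySem.Int.floordiv (a * (a + 1)) 2 + b * x + PySem.Int.floordiv (b * (b - 1)) 2)

-- ===== PRECONDITION & SPEC =====
def Spec_solution (x : Int) (y : Int) (out : String) : Prop := out = solution_alt x y
instance (x : Int) (y : Int) (out : String) : Decidable (Spec_solution x y out) := by unfold Spec_solution; infer_instance

-- ===== CLAIM (what is proved, stated in full; the proofs are below) =====
def Claim_equal_solution : Prop := ∀ (x : Int) (y : Int), Dom_solution x y → Spec_solution x y (solution x y)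

-- ===== LEMMAS AND PROOFS =====

-- A's loop body from state (w, i), run once per element, in closed form.
theorem pv_fold_list {α : Type} (l : List α) (w i : Int) :
    l.foldl (fun (st : Int × Int) _ => (st.1 + st.2, st.2 + 1)) (w, i)
      = (w + l.length * i + ((l.length : Int) * ((l.length : Int) - 1)) / 2, i + l.length) := by
  induction l generalizing w i with
  | nil => simp
  | cons h t ih =>
    rw [List.foldl_cons, ih]
    simp only [List.length_cons, Prod.mk.injEq]
    push_cast
    refine ⟨?_, by ring⟩
    have key : ((t.length : Int) + 1) * (((t.length : Int) + 1) - 1) / 2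
        = (t.length : Int) * ((t.length : Int) - 1) / 2 + (t.length : Int) := by
      have h2 : ((t.length : Int) + 1) * (((t.length : Int) + 1) - 1)
          = (t.length : Int) * ((t.length : Int) - 1) + (t.length : Int) * 2 := by ring
      rw [h2, Int.add_mul_ediv_right _ _ (by norm_num : (2:Int) ≠ 0)]
    rw [key]; ring

-- ===== VERDICT (by name: the statement is the Claim_ definition above) =====
theorem solution_spec : Claim_equal_solution := by
  intro x y _
  unfold Spec_solution
  simp only [solution, solution_alt]
  rw [pv_fold_list, pv_fold_list]
  simp only [PySem.List.length_pyRange_one, PySem.Int.floordiv]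
  congr 1
  have h1 : ((x - 0).toNat : Int) = max x 0 := by omega
  have h2 : (((y - 1) - 0).toNat : Int) = max (y - 1) 0 := by omega
  rw [h1, h2]
  set a := max x 0 with ha
  set b := max (y - 1) 0 with hb
  have ha0 : 0 ≤ a := le_max_right _ _
  have hb0 : 0 ≤ b := le_max_right _ _
  rw [Int.fdiv_eq_ediv, Int.fdiv_eq_ediv]
  have key : a * (a + 1) / 2 = a * (a - 1) / 2 + a := by
    have h2 : a * (a + 1) = a * (a - 1) + a * 2 := by ring
    rw [h2, Int.add_mul_ediv_right _ _ (by norm_num : (2:Int) ≠ 0)]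
  omega
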